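-- pv_equiv track=rewrite | github.com/suxian06/rosalind | MRNA.py | ReversTranslate
-- ===== SOURCE A (Python) =====
-- def ReversTranslate(aa):
--     """Given: A protein string of length at most 1000 aa.
--
-- Return: The total number of different RNA strings from which the protein could have been translated, modulo 1,000,000. (Don't neglect the importance of the stop codon in protein translation.)"""
--     rna_codon = {"UUU" : "F", "CUU" : "L", "AUU" : "I", "GUU" : "V",
--                "UUC" : "F", "CUC" : "L", "AUC" : "I", "GUC" : "V",
--                "UUA" : "L", "CUA" : "L", "AUA" : "I", "GUA" : "V",
--                "UUG" : "L", "CUG" : "L", "AUG" : "M", "GUG" : "V",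
--                "UCU" : "S", "CCU" : "P", "ACU" : "T", "GCU" : "A",
--                "UCC" : "S", "CCC" : "P", "ACC" : "T", "GCC" : "A",
--                "UCA" : "S", "CCA" : "P", "ACA" : "T", "GCA" : "A",
--                "UCG" : "S", "CCG" : "P", "ACG" : "T", "GCG" : "A",
--                "UAU" : "Y", "CAU" : "H", "AAU" : "N", "GAU" : "D",
--                "UAC" : "Y", "CAC" : "H", "AAC" : "N", "GAC" : "D",
--                "UAA" : "STOP", "CAA" : "Q", "AAA" : "K", "GAA" : "E",
--                "UAG" : "STOP", "CAG" : "Q", "AAG" : "K", "GAG" : "E",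
--                "UGU" : "C", "CGU" : "R", "AGU" : "S", "GGU" : "G",
--                "UGC" : "C", "CGC" : "R", "AGC" : "S", "GGC" : "G",
--                "UGA" : "STOP", "CGA" : "R", "AGA" : "R", "GGA" : "G",
--                "UGG" : "W", "CGG" : "R", "AGG" : "R", "GGG" : "G"
--                }
--     n = len(aa)
--     mult = 1
--     for i in range(n):
--         mult *= len([ k for k ,v in rna_codon.items() if v == aa[i]])
--     return mult*3 % 1000000 #modular arithmic
-- ===== SOURCE B (Python) =====
-- def ReversTranslate(aa):
--     """Given: A protein string of length at most 1000 aa.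
--
-- Return: The total number of different RNA strings from which the protein could have been translated, modulo 1,000,000. (Don't neglect the importance of the stop codon in protein translation.)"""
--     counts = {"F": 2, "L": 6, "I": 3, "V": 4, "M": 1, "S": 6, "P": 4,
--               "T": 4, "A": 4, "Y": 2, "H": 2, "N": 2, "D": 2, "Q": 2,
--               "K": 2, "E": 2, "C": 2, "R": 6, "G": 4, "W": 1}
--     freq = {}
--     for c in aa:
--         freq[c] = freq.get(c, 0) + 1
--     mult = 1
--     for c, e in freq.items():
--         mult = mult * pow(counts.get(c, 0), e, 1000000) % 1000000
--     return mult * 3 % 1000000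
-- ===== Notes on version B (the rewrite author's own statement) =====
-- stated objective: faster
-- what changed: B first builds a frequency histogram of the protein string in one pass, then multiplies one modular power pow(codon_count[aa], multiplicity, 1e6) per DISTINCT amino acid (at most 21 factors) using a precomputed codon-count table, instead of A's per-character 64-entry codon-table scan and unreduced big-integer product.
import Mathlib
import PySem

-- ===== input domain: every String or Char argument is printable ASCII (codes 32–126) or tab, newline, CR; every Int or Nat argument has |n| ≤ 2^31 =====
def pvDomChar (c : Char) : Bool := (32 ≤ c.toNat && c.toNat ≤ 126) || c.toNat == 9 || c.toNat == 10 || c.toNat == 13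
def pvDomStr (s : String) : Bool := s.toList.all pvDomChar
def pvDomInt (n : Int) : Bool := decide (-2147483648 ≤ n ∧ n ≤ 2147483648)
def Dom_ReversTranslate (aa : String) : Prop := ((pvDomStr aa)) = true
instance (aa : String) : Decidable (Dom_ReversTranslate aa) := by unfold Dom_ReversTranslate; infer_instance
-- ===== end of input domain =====

-- B builds a frequency histogram of the string in one pass and then multiplies one modular
-- power per DISTINCT amino acid (precomputed codon counts), replacing A's per-character
-- 64-entry codon-table scan and unreduced big-integer product (objective: faster).

-- ===== PORT A =====
-- the rna_codon dict literal, in insertion order (keys all distinct)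
def pvCodonTable : List (String × String) :=
  [("UUU", "F"), ("CUU", "L"), ("AUU", "I"), ("GUU", "V"),
   ("UUC", "F"), ("CUC", "L"), ("AUC", "I"), ("GUC", "V"),
   ("UUA", "L"), ("CUA", "L"), ("AUA", "I"), ("GUA", "V"),
   ("UUG", "L"), ("CUG", "L"), ("AUG", "M"), ("GUG", "V"),
   ("UCU", "S"), ("CCU", "P"), ("ACU", "T"), ("GCU", "A"),
   ("UCC", "S"), ("CCC", "P"), ("ACC", "T"), ("GCC", "A"),
   ("UCA", "S"), ("CCA", "P"), ("ACA", "T"), ("GCA", "A"),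
   ("UCG", "S"), ("CCG", "P"), ("ACG", "T"), ("GCG", "A"),
   ("UAU", "Y"), ("CAU", "H"), ("AAU", "N"), ("GAU", "D"),
   ("UAC", "Y"), ("CAC", "H"), ("AAC", "N"), ("GAC", "D"),
   ("UAA", "STOP"), ("CAA", "Q"), ("AAA", "K"), ("GAA", "E"),
   ("UAG", "STOP"), ("CAG", "Q"), ("AAG", "K"), ("GAG", "E"),
   ("UGU", "C"), ("CGU", "R"), ("AGU", "S"), ("GGU", "G"),
   ("UGC", "C"), ("CGC", "R"), ("AGC", "S"), ("GGC", "G"),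
   ("UGA", "STOP"), ("CGA", "R"), ("AGA", "R"), ("GGA", "G"),
   ("UGG", "W"), ("CGG", "R"), ("AGG", "R"), ("GGG", "G")]

def ReversTranslate (aa : String) : Int :=
  -- for i in range(n): mult *= len([k for k, v in rna_codon.items() if v == aa[i]])
  -- (aa[i] in Python is the 1-character string, hence the String.singleton comparison)
  let mult := aa.toList.foldl
    (fun m c => m * ((pvCodonTable.filter (fun kv => kv.2 == String.singleton c)).length : Int)) 1
  PySem.Int.mod (mult * 3) 1000000

-- ===== PORT B =====
-- counts = {"F": 2, "L": 6, …} with 1-character keys, ported with Char keys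
def pvAACounts : PySem.Dict Char Int := PySem.Dict.ofList [('F', 2), ('L', 6), ('I', 3), ('V', 4), ('M', 1), ('S', 6), ('P', 4), ('T', 4), ('A', 4), ('Y', 2), ('H', 2), ('N', 2), ('D', 2), ('Q', 2), ('K', 2), ('E', 2), ('C', 2), ('R', 6), ('G', 4), ('W', 1)]

def ReversTranslate_alt (aa : String) : Int :=
  -- freq = {}; for c in aa: freq[c] = freq.get(c, 0) + 1
  let freq := aa.toList.foldl (fun d c => d.insert c (d.getD c 0 + 1))
    (PySem.Dict.empty : PySem.Dict Char Int)
  -- for c, e in freq.items(): mult = mult * pow(counts.get(c, 0), e, 1000000) % 1000000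
  let mult := freq.items.foldl
    (fun m ce => PySem.Int.mod (m * PySem.Int.powMod (pvAACounts.getD ce.1 0) ce.2.toNat 1000000) 1000000) 1
  PySem.Int.mod (mult * 3) 1000000

-- ===== PRECONDITION & SPEC =====
def Spec_ReversTranslate (aa : String) (out : Int) : Prop := out = ReversTranslate_alt aa
instance (aa : String) (out : Int) : Decidable (Spec_ReversTranslate aa out) := by unfold Spec_ReversTranslate; infer_instance

-- ===== CLAIM (what is proved, stated in full; the proofs are below) =====
def Claim_equal_ReversTranslate : Prop := ∀ (aa : String), Dom_ReversTranslate aa → Spec_ReversTranslate aa (ReversTranslate aa)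

-- ===== LEMMAS AND PROOFS =====

lemma pvBeqSingleton (s : String) (c : Char) : (s == String.singleton c) = (s.toList == [c]) := by
  rw [Bool.eq_iff_iff]
  simp [String.singleton, String.ext_iff]

-- the per-character codon count A computes by scanning the table equals B's precomputed count
lemma pvCountEq (c : Char) :
    ((pvCodonTable.filter (fun kv => kv.2 == String.singleton c)).length : Int)
      = pvAACounts.getD c 0 := by
  by_cases h0 : c = 'F'
  · subst h0; decide
  by_cases h1 : c = 'L'
  · subst h1; decide
  by_cases h2 : c = 'I'
  · subst h2; decide
  by_cases h3 : c = 'V'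
  · subst h3; decide
  by_cases h4 : c = 'M'
  · subst h4; decide
  by_cases h5 : c = 'S'
  · subst h5; decide
  by_cases h6 : c = 'P'
  · subst h6; decide
  by_cases h7 : c = 'T'
  · subst h7; decide
  by_cases h8 : c = 'A'
  · subst h8; decide
  by_cases h9 : c = 'Y'
  · subst h9; decide
  by_cases h10 : c = 'H'
  · subst h10; decide
  by_cases h11 : c = 'N'
  · subst h11; decide
  by_cases h12 : c = 'D'
  · subst h12; decide
  by_cases h13 : c = 'Q'
  · subst h13; decide
  by_cases h14 : c = 'K'
  · subst h14; decide
  by_cases h15 : c = 'E'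
  · subst h15; decide
  by_cases h16 : c = 'C'
  · subst h16; decide
  by_cases h17 : c = 'R'
  · subst h17; decide
  by_cases h18 : c = 'G'
  · subst h18; decide
  by_cases h19 : c = 'W'
  · subst h19; decide
  have e0 : ('F' == c) = false := by simp; exact Ne.symm h0
  have e1 : ('L' == c) = false := by simp; exact Ne.symm h1
  have e2 : ('I' == c) = false := by simp; exact Ne.symm h2
  have e3 : ('V' == c) = false := by simp; exact Ne.symm h3
  have e4 : ('M' == c) = false := by simp; exact Ne.symm h4
  have e5 : ('S' == c) = false := by simp; exact Ne.symm h5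
  have e6 : ('P' == c) = false := by simp; exact Ne.symm h6
  have e7 : ('T' == c) = false := by simp; exact Ne.symm h7
  have e8 : ('A' == c) = false := by simp; exact Ne.symm h8
  have e9 : ('Y' == c) = false := by simp; exact Ne.symm h9
  have e10 : ('H' == c) = false := by simp; exact Ne.symm h10
  have e11 : ('N' == c) = false := by simp; exact Ne.symm h11
  have e12 : ('D' == c) = false := by simp; exact Ne.symm h12
  have e13 : ('Q' == c) = false := by simp; exact Ne.symm h13
  have e14 : ('K' == c) = false := by simp; exact Ne.symm h14
  have e15 : ('E' == c) = false := by simp; exact Ne.symm h15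
  have e16 : ('C' == c) = false := by simp; exact Ne.symm h16
  have e17 : ('R' == c) = false := by simp; exact Ne.symm h17
  have e18 : ('G' == c) = false := by simp; exact Ne.symm h18
  have e19 : ('W' == c) = false := by simp; exact Ne.symm h19
  simp [pvCodonTable, pvAACounts, List.filter, pvBeqSingleton, PySem.Dict.getD, PySem.Dict.get?,
        PySem.Dict.ofList, PySem.Dict.update, PySem.Dict.empty, PySem.Dict.insert, List.find?,
        e0, e1, e2, e3, e4, e5, e6, e7, e8, e9, e10, e11, e12, e13, e14, e15, e16, e17, e18, e19]

-- A's running product is the plain list product of the per-character counts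
lemma pvFoldA (g : Char → Int) (l : List Char) :
    l.foldl (fun m c => m * g c) 1 = (l.map g).prod := by
  rw [List.prod_eq_foldl, List.foldl_map]

-- B's mod-at-every-step multiplication loop computes the product modulo 1000000
lemma pvFoldMulMod {α : Type} (h : α → Int) (xs : List α) (s : Int) :
    xs.foldl (fun m x => PySem.Int.mod (m * h x) 1000000) (s % 1000000)
      = (s * (xs.map h).prod) % 1000000 := by
  simp only [PySem.Int.mod_eq_emod_of_pos (show (0 : Int) < 1000000 by norm_num)]
  induction xs generalizing s with
  | nil => simp
  | cons x xs ih =>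
    simp only [List.foldl_cons, List.map_cons, List.prod_cons]
    have h1 : (s % 1000000 * h x) % 1000000 = (s * h x) % 1000000 := by
      conv_rhs => rw [Int.mul_emod]
      rw [Int.mul_emod, Int.emod_emod_of_dvd _ dvd_rfl]
    rw [h1, ← mul_assoc s (h x), ← ih (s * h x)]

-- grouping the product by distinct characters (with multiplicities) changes nothing
lemma pvGroupProd (g : Char → Int) (l : List Char) :
    ((PySem.Set.ofList l).map (fun k => g k ^ (l.count k))).prod = (l.map g).prod := by
  have hperm : (PySem.Set.ofList l : List Char).Perm l.dedup := by
    rw [List.perm_ext_iff_of_nodup ?_ l.nodup_dedup]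
    · intro a; simp [PySem.Set.mem_ofList, List.mem_dedup]
    · exact PySem.Set.nodup_ofList l
  calc ((PySem.Set.ofList l).map (fun k => g k ^ (l.count k))).prod
      = (l.dedup.map (fun k => g k ^ (l.count k))).prod := (hperm.map _).prod_eq
    _ = l.toFinset.prod (fun k => g k ^ (l.count k)) := rfl
    _ = (l.map g).prod := by
          rw [← Multiset.prod_coe (l.map g), ← Multiset.map_coe,
              Finset.prod_multiset_map_count]
          simp

-- ===== VERDICT (by name: the statement is the Claim_ definition above) =====
theorem ReversTranslate_spec : Claim_equal_ReversTranslate := by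
  intro aa _
  unfold Spec_ReversTranslate ReversTranslate ReversTranslate_alt
  simp only [pvCountEq, PySem.Dict.foldl_insert_getD_add_one_eq_counter,
             PySem.Dict.items_counter]
  rw [pvFoldA]
  rw [show (1 : Int) = 1 % 1000000 from by norm_num, pvFoldMulMod]
  simp only [one_mul, List.map_map]
  have hmap : ((PySem.Set.ofList aa.toList : List Char).map
        ((fun ce : Char × Int => PySem.Int.powMod (pvAACounts.getD ce.1 0) ce.2.toNat 1000000)
          ∘ fun k => (k, (aa.toList.count k : Int))))
      = (PySem.Set.ofList aa.toList : List Char).map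
          (fun k => (pvAACounts.getD k 0 ^ aa.toList.count k) % 1000000) := by
    apply List.map_congr_left
    intro k _
    simp [PySem.Int.powMod]
  rw [hmap]
  have hdrop : ((PySem.Set.ofList aa.toList : List Char).map
        (fun k => (pvAACounts.getD k 0 ^ aa.toList.count k) % 1000000)).prod % 1000000
      = ((PySem.Set.ofList aa.toList : List Char).map
        (fun k => pvAACounts.getD k 0 ^ aa.toList.count k)).prod % 1000000 := by
    have : ((PySem.Set.ofList aa.toList : List Char).map
          (fun k => (pvAACounts.getD k 0 ^ aa.toList.count k) % 1000000))
        = ((PySem.Set.ofList aa.toList : List Char).map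
            (fun k => pvAACounts.getD k 0 ^ aa.toList.count k)).map (fun x : Int => x % 1000000) := by
      rw [List.map_map]; rfl
    rw [this, ← List.prod_int_mod]
  simp only [PySem.Int.mod_eq_emod_of_pos (show (0 : Int) < 1000000 by norm_num)]
  rw [hdrop, pvGroupProd]
  conv_lhs => rw [Int.mul_emod]
  conv_rhs => rw [Int.mul_emod, Int.emod_emod_of_dvd _ dvd_rfl]
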